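-- pv_equiv track=rewrite | github.com/ElyesT0/complexity_estimation | 1-Scripts/analysis_scripts/modules/modules/functions.py | array_structure
-- ===== SOURCE A (Python) =====
-- def array_structure(arr):
--     seen = set()
--     ordered_list = []
--     for item in arr:
--         if item not in seen:
--             seen.add(item)
--             ordered_list.append(item)
--     arr_dict=dict(zip(ordered_list,range(len(ordered_list))))
--     return [arr_dict.get(item, -1) for item in arr]
-- ===== SOURCE B (Python) =====
-- def array_structure(arr):
--     # Sort-based: no set, dict or hash table anywhere.
--     # 1. sort (value, position) pairs so equal values become adjacent runs;
--     # 2. annotate every element with its value's first position (head of its run);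
--     # 3. re-sort by that first position, number the runs 0,1,2,... (= first-occurrence rank);
--     # 4. sort back into original order and emit the ranks.
--     n = len(arr)
--     pairs = sorted(zip(arr, range(n)))
--     byval = []                       # (first position of the value, position)
--     prev = None
--     cur = 0
--     for v, i in pairs:
--         if prev is None or v != prev:
--             cur = i
--         byval.append((cur, i))
--         prev = v
--     byval.sort()
--     out_pairs = []                   # (position, rank of the value)
--     prevf = None
--     r = -1
--     for f, i in byval:
--         if prevf is None or f != prevf:
--             r = r + 1
--         out_pairs.append((i, r))
--         prevf = f
--     out_pairs.sort()
--     return [r for _, r in out_pairs]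
-- ===== Notes on version B (the rewrite author's own statement) =====
-- stated objective: alternative
-- what changed: B replaces A's hash-based pipeline (seen-set + ordered_list + dict(zip) + lookup comprehension) by a pure sort-based one: sort (value, position) pairs, annotate each element with its value's first position from the head of its run, re-sort by that first position and number the runs consecutively, then sort back into original order; no set or dict appears anywhere in B.
import Mathlib
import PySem

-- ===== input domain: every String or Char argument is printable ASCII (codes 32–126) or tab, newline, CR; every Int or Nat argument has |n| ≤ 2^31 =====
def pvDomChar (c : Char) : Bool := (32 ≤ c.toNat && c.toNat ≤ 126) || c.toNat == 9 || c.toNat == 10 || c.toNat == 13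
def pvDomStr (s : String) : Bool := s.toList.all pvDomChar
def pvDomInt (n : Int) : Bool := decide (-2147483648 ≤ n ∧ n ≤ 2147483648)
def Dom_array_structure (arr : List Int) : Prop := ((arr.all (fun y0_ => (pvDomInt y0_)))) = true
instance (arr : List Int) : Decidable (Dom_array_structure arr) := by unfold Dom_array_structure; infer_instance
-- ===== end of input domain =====

-- B replaces A's hash-based pipeline (seen-set, ordered_list, dict(zip), lookup) by a
-- sort-based one: sort (value, position) pairs, annotate each element with its value's
-- first position, re-sort by that position and number the runs, sort back
-- (objective: alternative — no set or dict anywhere in B).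

-- ===== PORT A =====
def array_structure (arr : List Int) : List Int :=
  -- seen = set(); ordered_list = []; for item in arr: if item not in seen: seen.add(item); ordered_list.append(item)
  let st := arr.foldl
    (fun (p : PySem.Set Int × List Int) item =>
      if !(PySem.Set.contains p.1 item) then (PySem.Set.add p.1 item, p.2 ++ [item]) else p)
    (PySem.Set.empty, [])
  -- arr_dict = dict(zip(ordered_list, range(len(ordered_list))))
  let arr_dict : PySem.Dict Int Int :=
    PySem.Dict.ofList (st.2.zip (PySem.List.pyRange 0 (st.2.length : Int) 1))
  -- [arr_dict.get(item, -1) for item in arr]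
  arr.map (fun item => arr_dict.getD item (-1))

-- ===== PORT B =====
def array_structure_alt (arr : List Int) : List Int :=
  let n : Int := (arr.length : Int)
  -- pairs = sorted(zip(arr, range(n)))            (tuples compare lexicographically)
  let pairs := PySem.List.sorted2 (arr.zip (PySem.List.pyRange 0 n 1)) Prod.fst Prod.snd false
  -- byval = []; prev = None; cur = 0
  -- for v, i in pairs: if prev is None or v != prev: cur = i; byval.append((cur, i)); prev = v
  let s1 := pairs.foldl
    (fun (st : Option Int × Int × List (Int × Int)) p =>
      let cur' := if st.1 ≠ some p.1 then p.2 else st.2.1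
      (some p.1, cur', st.2.2 ++ [(cur', p.2)]))
    (none, 0, [])
  -- byval.sort()
  let byval := PySem.List.sorted2 s1.2.2 Prod.fst Prod.snd false
  -- out_pairs = []; prevf = None; r = -1
  -- for f, i in byval: if prevf is None or f != prevf: r = r + 1; out_pairs.append((i, r)); prevf = f
  let s2 := byval.foldl
    (fun (st : Option Int × Int × List (Int × Int)) q =>
      let r' := if st.1 ≠ some q.1 then st.2.1 + 1 else st.2.1
      (some q.1, r', st.2.2 ++ [(q.2, r')]))
    (none, -1, [])
  -- out_pairs.sort()
  let outp := PySem.List.sorted2 s2.2.2 Prod.fst Prod.snd false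
  -- [r for _, r in out_pairs]
  outp.map Prod.snd

-- ===== PRECONDITION & SPEC =====
def Spec_array_structure (arr : List Int) (out : List Int) : Prop := out = array_structure_alt arr
instance (arr : List Int) (out : List Int) : Decidable (Spec_array_structure arr out) := by unfold Spec_array_structure; infer_instance

-- ===== CLAIM (what is proved, stated in full; the proofs are below) =====
def Claim_equal_array_structure : Prop := ∀ (arr : List Int), Dom_array_structure arr → Spec_array_structure arr (array_structure arr)

-- ===== LEMMAS AND PROOFS =====

-- ---------- A-side characterisation (value ↦ index of first occurrence) ----------

-- the dict A builds from an ordered list of first occurrences: element ↦ its position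
def ddict (l : List Int) : PySem.Dict Int Int :=
  PySem.Dict.ofList (l.zip (PySem.List.pyRange 0 (l.length : Int) 1))

theorem ddict_nil : ddict [] = PySem.Dict.empty := rfl

theorem ddict_append (l : List Int) (a : Int) :
    ddict (l ++ [a]) = (ddict l).insert a (l.length : Int) := by
  have hof : ∀ (ps : List (Int × Int)),
      PySem.Dict.ofList ps = ps.foldl (fun d p => d.insert p.1 p.2) PySem.Dict.empty := fun _ => rfl
  unfold ddict
  have hlen : (((l ++ [a]).length : Nat) : Int) = (l.length : Int) + 1 := by simp
  rw [hlen, PySem.List.pyRange_one_succ_right (Int.natCast_nonneg l.length),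
    List.zip_append (by simp [PySem.List.length_pyRange_one]), hof, List.foldl_append, ← hof]
  rfl

theorem idxOf_append_self (l : List Int) (a : Int) (h : a ∉ l) :
    List.idxOf a (l ++ [a]) = l.length := by
  induction l with
  | nil => simp
  | cons b bs ih => simp at h; simp [ih h.2, Ne.symm h.1]

theorem ddict_getD (l : List Int) (h : l.Nodup) (x d : Int) :
    (ddict l).getD x d = if x ∈ l then (List.idxOf x l : Int) else d := by
  induction l using List.reverseRecOn with
  | nil => simp [ddict_nil]
  | append_singleton l a ih =>
    have hn : l.Nodup ∧ a ∉ l := by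
      rw [List.nodup_append] at h
      exact ⟨h.1, fun hal => h.2.2 a hal a (by simp) rfl⟩
    rw [ddict_append, PySem.Dict.getD_insert]
    by_cases hxa : x = a
    · subst hxa
      simp [idxOf_append_self l x hn.2]
    · rw [if_neg hxa, ih hn.1]
      by_cases hxl : x ∈ l
      · simp [hxl, List.idxOf_append_of_mem hxl]
      · simp [hxl, hxa]

-- A's dedup loop: started with seen = ordered_list, both components stay equal and end as s.update(xs)
theorem loopA (xs : List Int) (s : PySem.Set Int) :
    xs.foldl
      (fun (p : PySem.Set Int × List Int) item =>
        if !(PySem.Set.contains p.1 item) then (PySem.Set.add p.1 item, p.2 ++ [item]) else p)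
      (s, s)
    = (PySem.Set.update s xs, PySem.Set.update s xs) := by
  induction xs generalizing s with
  | nil => simp [PySem.Set.update_nil]
  | cons x xs ih =>
    rw [List.foldl_cons, PySem.Set.update_cons]
    by_cases hx : x ∈ s
    · have hc : PySem.Set.contains s x = true := by
        simpa [PySem.Set.contains_iff] using hx
      simp only [hc, Bool.not_true, Bool.false_eq_true, if_false]
      rw [PySem.Set.add_of_mem hx]
      exact ih s
    · have hc : PySem.Set.contains s x = false := by
        rw [← Bool.not_eq_true, PySem.Set.contains_iff]; exact hx
      simp only [hc, Bool.not_false, if_true]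
      rw [PySem.Set.add_of_not_mem hx]
      exact ih (s ++ [x])

theorem portA_eq (arr : List Int) :
    array_structure arr
      = arr.map (fun x => (ddict (PySem.Set.ofList arr)).getD x (-1)) := by
  show arr.map (fun item =>
      (ddict ((arr.foldl
        (fun (p : PySem.Set Int × List Int) item =>
          if !(PySem.Set.contains p.1 item) then (PySem.Set.add p.1 item, p.2 ++ [item]) else p)
        (PySem.Set.empty, PySem.Set.empty)).2)).getD item (-1)) = _
  rw [loopA arr PySem.Set.empty]
  rfl

-- set(xs) peels its head: the first element, then set of the tail with that value removed
theorem ofList_cons (u : Int) (l : List Int) :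
    PySem.Set.ofList (u :: l) = u :: (PySem.Set.ofList l).filter (· != u) := by
  have h : PySem.Set.ofList (u :: l) = PySem.Set.update [u] l := rfl
  rw [h, PySem.Set.update_eq_append_filter]
  simp only [List.singleton_append, List.cons.injEq, true_and]
  apply List.filter_congr
  intro y _
  by_cases h : y = u
  · subst h
    have hc : PySem.Set.contains [y] y = true := by
      rw [PySem.Set.contains_iff]; simp
    rw [hc]; simp
  · have hc : PySem.Set.contains [u] y = false := by
      rw [← Bool.not_eq_true, PySem.Set.contains_iff]; simp [h]
    rw [hc]; simp [h]

-- ---------- shared vocabulary for the B-side proof ----------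

-- first-occurrence index of a value, and its rank (position in dedup order)
def fidx (arr : List Int) (v : Int) : Int := (List.idxOf v arr : Int)
def rkD (arr : List Int) (v : Int) : Int := (List.idxOf v (PySem.Set.ofList arr) : Int)

-- zip(arr, range(s, s+len(arr))), the generalized-offset form of zip(arr, range(n))
def zf (arr : List Int) (s : Int) : List (Int × Int) :=
  arr.zip (PySem.List.pyRange s (s + (arr.length : Int)) 1)

-- the run of pairs carrying value v
def blk (arr : List Int) (v : Int) : List (Int × Int) :=
  (zf arr 0).filter (fun p => p.1 == v)

-- Python's lexicographic '<' on int pairs, as sorted2 compares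
def blex (a b : Int × Int) : Bool :=
  decide (a.1 < b.1) || (!decide (b.1 < a.1) && decide (a.2 < b.2))

theorem blex_iff (a b : Int × Int) :
    blex a b = true ↔ (a.1 < b.1 ∨ (a.1 = b.1 ∧ a.2 < b.2)) := by
  simp [blex]; omega

theorem blex_asymm {a b : Int × Int} (h : blex a b = true) : blex b a = false := by
  rw [← Bool.not_eq_true]; rw [blex_iff] at *; omega

theorem blex_trans {a b c : Int × Int} (h1 : blex a b = true) (h2 : blex b c = true) :
    blex a c = true := by
  rw [blex_iff] at *; omega

theorem blex_total_eq {a b : Int × Int} (h1 : blex a b = false) (h2 : blex b a = false) :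
    a = b := by
  rw [← Bool.not_eq_true] at h1 h2; rw [blex_iff] at h1 h2
  have : a.1 = b.1 ∧ a.2 = b.2 := by omega
  exact Prod.ext this.1 this.2

-- ---------- insertion sort (sorted2 with fst/snd keys) named by its output ----------

theorem insertBy_perm (bef : Int × Int → Int × Int → Bool) (x : Int × Int)
    (l : List (Int × Int)) : (PySem.List.insertBy bef x l).Perm (x :: l) := by
  induction l with
  | nil => simp [PySem.List.insertBy]
  | cons y ys ih =>
    rw [PySem.List.insertBy]
    by_cases hb : bef x y = true
    · simp [hb]
    · simp only [hb, Bool.false_eq_true, if_false]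
      exact (ih.cons y).trans (List.Perm.swap x y ys)

theorem insertBy_pairwise (x : Int × Int) (l : List (Int × Int))
    (h : l.Pairwise (fun a b => blex b a = false)) :
    (PySem.List.insertBy blex x l).Pairwise (fun a b => blex b a = false) := by
  induction l with
  | nil => simp [PySem.List.insertBy]
  | cons y ys ih =>
    rw [PySem.List.insertBy]
    rcases List.pairwise_cons.mp h with ⟨hy, hys⟩
    by_cases hb : blex x y = true
    · simp only [hb, if_true]
      refine List.pairwise_cons.mpr ⟨?_, h⟩
      intro z hz
      rcases List.mem_cons.mp hz with rfl | hz2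
      · exact blex_asymm hb
      · by_contra hc
        rw [Bool.not_eq_false] at hc
        have := blex_trans hc hb
        rw [hy z hz2] at this
        exact Bool.false_ne_true this
    · simp only [hb, Bool.false_eq_true, if_false]
      refine List.pairwise_cons.mpr ⟨?_, ih hys⟩
      intro z hz
      have hz1 := (insertBy_perm blex x ys).mem_iff.mp hz
      rcases List.mem_cons.mp hz1 with rfl | hz2
      · exact Bool.not_eq_true _ |>.mp hb
      · exact hy z hz2

theorem foldl_insertBy_perm (xs acc : List (Int × Int)) :
    (xs.foldl (fun acc x => PySem.List.insertBy blex x acc) acc).Perm (xs ++ acc) := by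
  induction xs generalizing acc with
  | nil => simp
  | cons x xs ih =>
    rw [List.foldl_cons]
    refine (ih _).trans ?_
    refine (List.Perm.append_left xs (insertBy_perm blex x acc)).trans ?_
    exact List.perm_middle

theorem foldl_insertBy_pairwise (xs acc : List (Int × Int))
    (h : acc.Pairwise (fun a b => blex b a = false)) :
    (xs.foldl (fun acc x => PySem.List.insertBy blex x acc) acc).Pairwise
      (fun a b => blex b a = false) := by
  induction xs generalizing acc with
  | nil => exact h
  | cons x xs ih => exact ih _ (insertBy_pairwise x acc h)

-- any strictly increasing rearrangement names the sort's output
theorem sorted2_eq (xs ys : List (Int × Int)) (hperm : ys.Perm xs)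
    (hs : ys.Pairwise (fun a b => blex a b = true)) :
    PySem.List.sorted2 xs Prod.fst Prod.snd false = ys := by
  have hdef : PySem.List.sorted2 xs Prod.fst Prod.snd false
      = xs.foldl (fun acc x => PySem.List.insertBy blex x acc) [] := rfl
  rw [hdef]
  refine List.eq_of_perm_of_sorted (le := fun a b => blex b a = false)
    (fun a b _ _ h1 h2 => blex_total_eq (a := a) (b := b) h2 h1) ?_ ?_ ?_
  · exact foldl_insertBy_pairwise xs [] (by simp)
  · exact hs.imp (fun h => blex_asymm h)
  · exact ((foldl_insertBy_perm xs []).trans (by simp)).trans hperm.symm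

-- ---------- structure of zf and its runs ----------

theorem zf_cons (x : Int) (l : List Int) (s : Int) :
    zf (x :: l) s = (x, s) :: zf l (s + 1) := by
  unfold zf
  have h1 : s < s + ((x :: l).length : Int) := by
    simp only [List.length_cons]; push_cast; omega
  rw [PySem.List.pyRange_one_cons h1]
  have h2 : s + ((x :: l).length : Int) = (s + 1) + (l.length : Int) := by
    simp only [List.length_cons]; push_cast; omega
  rw [h2, List.zip_cons_cons]

theorem zf_fst (arr : List Int) (s : Int) : (zf arr s).map Prod.fst = arr := by
  induction arr generalizing s with
  | nil => rfl
  | cons x l ih => rw [zf_cons, List.map_cons, ih]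

theorem zf_snd_ge (arr : List Int) (s : Int) : ∀ p ∈ zf arr s, s ≤ p.2 := by
  induction arr generalizing s with
  | nil => intro p hp; simp [zf] at hp
  | cons x l ih =>
    intro p hp
    rw [zf_cons] at hp
    rcases List.mem_cons.mp hp with rfl | hp2
    · exact le_refl s
    · have := ih (s + 1) p hp2; omega

theorem zf_pairwise (arr : List Int) (s : Int) :
    (zf arr s).Pairwise (fun p q => p.2 < q.2) := by
  induction arr generalizing s with
  | nil => simp [zf]
  | cons x l ih =>
    rw [zf_cons]
    refine List.pairwise_cons.mpr ⟨?_, ih (s + 1)⟩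
    intro q hq
    have := zf_snd_ge l (s + 1) q hq
    simpa using by omega

theorem zf_mem_fst (arr : List Int) (s : Int) {p : Int × Int} (h : p ∈ zf arr s) :
    p.1 ∈ arr := by
  have : p.1 ∈ (zf arr s).map Prod.fst := List.mem_map_of_mem h
  rwa [zf_fst] at this

theorem filter_zf_head (arr : List Int) (v : Int) (s : Int) (hv : v ∈ arr) :
    ∃ t, (zf arr s).filter (fun p => p.1 == v)
        = (v, s + (List.idxOf v arr : Int)) :: t := by
  induction arr generalizing s with
  | nil => exact absurd hv (List.not_mem_nil)
  | cons x l ih =>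
    rw [zf_cons, List.filter_cons]
    by_cases hx : x = v
    · simp only [show (x == v) = true by simpa using hx, if_true]
      refine ⟨List.filter (fun p => p.1 == v) (zf l (s + 1)), ?_⟩
      rw [hx]
      simp
    · have hv' : v ∈ l := by
        rcases List.mem_cons.mp hv with h | h
        · exact absurd h.symm hx
        · exact h
      simp only [show (x == v) = false by simpa using hx, Bool.false_eq_true, if_false]
      rcases ih (s + 1) hv' with ⟨t, ht⟩
      refine ⟨t, ht.trans ?_⟩
      rw [List.idxOf_cons_ne _ (by exact hx)]
      simp only [Nat.succ_eq_add_one]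
      push_cast
      ring_nf

theorem blk_fst (arr : List Int) (v : Int) {p : Int × Int} (h : p ∈ blk arr v) :
    p.1 = v := by
  have := (List.mem_filter.mp h).2
  simpa using this

theorem blk_head (arr : List Int) (v : Int) (hv : v ∈ arr) :
    ∃ t, blk arr v = (v, fidx arr v) :: t := by
  rcases filter_zf_head arr v 0 hv with ⟨t, ht⟩
  exact ⟨t, by rw [blk, ht]; simp [fidx]⟩

theorem blk_snd_pairwise (arr : List Int) (v : Int) :
    (blk arr v).Pairwise (fun p q => p.2 < q.2) := by
  exact (zf_pairwise arr 0).filter _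

-- partition: the runs, in any duplicate-free order covering all values, are a permutation
theorem perm_flatMap_filter (Z : List (Int × Int)) (vs : List Int) (hnd : vs.Nodup)
    (hcov : ∀ p ∈ Z, p.1 ∈ vs) :
    (vs.flatMap (fun v => Z.filter (fun p => p.1 == v))).Perm Z := by
  induction vs generalizing Z with
  | nil =>
    have : Z = [] := by
      cases Z with
      | nil => rfl
      | cons p t => exact absurd (hcov p (List.mem_cons_self)) (List.not_mem_nil)
    simp [this]
  | cons v vs ih =>
    rw [List.flatMap_cons]
    have hsplit := List.filter_append_perm (fun p => p.1 == v) Z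
    -- the later runs live entirely in the ≠ v remainder
    have hrest : vs.flatMap (fun w => Z.filter (fun p => p.1 == w))
        = vs.flatMap (fun w => (Z.filter (fun p => !(p.1 == v))).filter (fun p => p.1 == w)) := by
      refine List.flatMap_congr ?_
      intro w hw
      rw [List.filter_filter]
      refine (List.filter_congr ?_).symm
      intro p _
      by_cases hp : p.1 = w
      · have hvw : v ≠ w := fun h => (List.nodup_cons.mp hnd).1 (h ▸ hw)
        simp only [hp]
        simp
        exact fun h => hvw h.symm
      · simp [show (p.1 == w) = false by simpa using hp]
    rw [hrest]
    refine (List.Perm.append_left _ (ih (Z.filter (fun p => !(p.1 == v))) ?_ ?_)).trans hsplit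
    · exact (List.nodup_cons.mp hnd).2
    · intro p hp
      rcases List.mem_filter.mp hp with ⟨hpZ, hne⟩
      rcases List.mem_cons.mp (hcov p hpZ) with h | h
      · simp [h] at hne
      · exact h

-- dedup order is first-occurrence order
theorem D_pairwise_idxOf (arr : List Int) :
    (PySem.Set.ofList arr).Pairwise (fun a b => List.idxOf a arr < List.idxOf b arr) := by
  induction arr with
  | nil => simp [PySem.Set.ofList]
  | cons u l ih =>
    rw [ofList_cons]
    refine List.pairwise_cons.mpr ⟨?_, ?_⟩
    · intro b hb
      have hbu : b ≠ u := by
        have := (List.mem_filter.mp hb).2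
        simpa using this
      rw [List.idxOf_cons_self, List.idxOf_cons_ne _ (Ne.symm hbu)]
      exact Nat.succ_pos _
    · refine (ih.filter _).imp_of_mem ?_
      intro a b ha hb hlt
      have hau : a ≠ u := by simpa using (List.mem_filter.mp ha).2
      have hbu : b ≠ u := by simpa using (List.mem_filter.mp hb).2
      rw [List.idxOf_cons_ne _ (Ne.symm hau), List.idxOf_cons_ne _ (Ne.symm hbu)]
      omega

-- ---------- the two scans ----------

theorem scan1_block (v cur : Int) (B : List (Int × Int)) (acc : List (Int × Int))
    (hB : ∀ p ∈ B, p.1 = v) :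
    B.foldl
      (fun (st : Option Int × Int × List (Int × Int)) p =>
        let cur' := if st.1 ≠ some p.1 then p.2 else st.2.1
        (some p.1, cur', st.2.2 ++ [(cur', p.2)]))
      (some v, cur, acc)
    = (some v, cur, acc ++ B.map (fun p => (cur, p.2))) := by
  induction B generalizing acc with
  | nil => simp
  | cons p B ih =>
    have hp : p.1 = v := hB p (List.mem_cons_self)
    rw [List.foldl_cons]
    rw [show p.1 = v from hp, if_neg (show ¬(some v ≠ some v) by simp)]
    rw [ih (acc ++ [(cur, p.2)]) (fun q hq => hB q (List.mem_cons_of_mem p hq))]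
    simp

theorem scan1_blocks (arr : List Int) (vs : List Int) (prev : Option Int) (cur : Int)
    (acc : List (Int × Int)) (hnd : vs.Nodup) (hmem : ∀ v ∈ vs, v ∈ arr)
    (hprev : ∀ v ∈ vs, prev ≠ some v) :
    ∃ pr c,
      (vs.flatMap (fun v => blk arr v)).foldl
        (fun (st : Option Int × Int × List (Int × Int)) p =>
          let cur' := if st.1 ≠ some p.1 then p.2 else st.2.1
          (some p.1, cur', st.2.2 ++ [(cur', p.2)]))
        (prev, cur, acc)
      = (pr, c, acc ++ vs.flatMap (fun v => (blk arr v).map (fun p => (fidx arr v, p.2)))) := by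
  induction vs generalizing prev cur acc with
  | nil => exact ⟨prev, cur, by simp⟩
  | cons v vs ih =>
    rcases blk_head arr v (hmem v (List.mem_cons_self)) with ⟨t, ht⟩
    have htv : ∀ p ∈ t, p.1 = v := by
      intro p hp
      exact blk_fst arr v (by rw [ht]; exact List.mem_cons_of_mem _ hp)
    rw [List.flatMap_cons, List.foldl_append, ht, List.foldl_cons]
    simp only [ne_eq, if_pos (by simpa using hprev v (List.mem_cons_self))]
    rw [scan1_block v (fidx arr v) t _ htv]
    rcases ih (some v) (fidx arr v)
        (acc ++ [(fidx arr v, fidx arr v)] ++ t.map (fun p => (fidx arr v, p.2)))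
        (List.nodup_cons.mp hnd).2
        (fun w hw => hmem w (List.mem_cons_of_mem v hw))
        (fun w hw h => (List.nodup_cons.mp hnd).1 (by injection h with h'; exact h' ▸ hw)) with ⟨pr, c, hc⟩
    refine ⟨pr, c, hc.trans ?_⟩
    rw [List.flatMap_cons, ht]
    simp

theorem scan2_block (F r : Int) (B : List (Int × Int)) (acc : List (Int × Int))
    (hB : ∀ p ∈ B, p.1 = F) :
    B.foldl
      (fun (st : Option Int × Int × List (Int × Int)) q =>
        let r' := if st.1 ≠ some q.1 then st.2.1 + 1 else st.2.1
        (some q.1, r', st.2.2 ++ [(q.2, r')]))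
      (some F, r, acc)
    = (some F, r, acc ++ B.map (fun q => (q.2, r))) := by
  induction B generalizing acc with
  | nil => simp
  | cons q B ih =>
    have hq : q.1 = F := hB q (List.mem_cons_self)
    rw [List.foldl_cons]
    rw [show q.1 = F from hq, if_neg (show ¬(some F ≠ some F) by simp)]
    rw [ih (acc ++ [(q.2, r)]) (fun p hp => hB p (List.mem_cons_of_mem q hp))]
    simp

theorem scan2_blocks (arr : List Int) (vs : List Int) (prev : Option Int) (r0 : Int)
    (acc : List (Int × Int)) (hnd : vs.Nodup) (hmem : ∀ v ∈ vs, v ∈ arr)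
    (hpw : vs.Pairwise (fun v w => fidx arr v < fidx arr w))
    (hprev : ∀ v ∈ vs, prev ≠ some (fidx arr v))
    (hrk : ∀ v ∈ vs, rkD arr v = r0 + 1 + (List.idxOf v vs : Int)) :
    ∃ pr c,
      (vs.flatMap (fun v => (blk arr v).map (fun p => (fidx arr v, p.2)))).foldl
        (fun (st : Option Int × Int × List (Int × Int)) q =>
          let r' := if st.1 ≠ some q.1 then st.2.1 + 1 else st.2.1
          (some q.1, r', st.2.2 ++ [(q.2, r')]))
        (prev, r0, acc)
      = (pr, c, acc ++ vs.flatMap (fun v => (blk arr v).map (fun p => (p.2, rkD arr v)))) := by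
  induction vs generalizing prev r0 acc with
  | nil => exact ⟨prev, r0, by simp⟩
  | cons v vs ih =>
    rcases blk_head arr v (hmem v (List.mem_cons_self)) with ⟨t, ht⟩
    have htv : ∀ p ∈ t, p.1 = v := by
      intro p hp
      exact blk_fst arr v (by rw [ht]; exact List.mem_cons_of_mem _ hp)
    have hrv : rkD arr v = r0 + 1 := by
      have := hrk v (List.mem_cons_self)
      rw [List.idxOf_cons_self] at this
      omega
    rw [List.flatMap_cons, List.foldl_append, ht, List.map_cons, List.foldl_cons]
    simp only [ne_eq, if_pos (by simpa using hprev v (List.mem_cons_self))]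
    have htv' : ∀ q ∈ t.map (fun p => (fidx arr v, p.2)), q.1 = fidx arr v := by
      intro q hq
      rcases List.mem_map.mp hq with ⟨p, _, rfl⟩
      rfl
    rw [scan2_block (fidx arr v) (r0 + 1) _ _ htv']
    rcases ih (some (fidx arr v)) (r0 + 1)
        (acc ++ [(fidx arr v, r0 + 1)] ++ (t.map (fun p => (fidx arr v, p.2))).map (fun q => (q.2, r0 + 1)))
        (List.nodup_cons.mp hnd).2
        (fun w hw => hmem w (List.mem_cons_of_mem v hw))
        ((List.pairwise_cons.mp hpw).2)
        (fun w hw h => by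
          have hlt := (List.pairwise_cons.mp hpw).1 w hw
          injection h with h'
          omega)
        (fun w hw => by
          have h1 := hrk w (List.mem_cons_of_mem v hw)
          have hwv : w ≠ v := fun h => (List.nodup_cons.mp hnd).1 (h ▸ hw)
          rw [List.idxOf_cons_ne _ (Ne.symm hwv)] at h1
          push_cast at h1 ⊢
          omega) with ⟨pr, c, hc⟩
    refine ⟨pr, c, hc.trans ?_⟩
    rw [List.flatMap_cons, ht, List.map_cons, hrv]
    simp [Function.comp]

-- ---------- assembling port B's value ----------

theorem blex_of_fst_lt {x y : Int × Int} (h : x.1 < y.1) : blex x y = true := by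
  rw [blex_iff]; omega

theorem blex_of_fst_eq_snd_lt {x y : Int × Int} (h1 : x.1 = y.1) (h2 : x.2 < y.2) :
    blex x y = true := by
  rw [blex_iff]; omega

theorem portB_eq (arr : List Int) :
    array_structure_alt arr = arr.map (fun x => rkD arr x) := by
  have hZ : arr.zip (PySem.List.pyRange 0 ((arr.length : Int)) 1) = zf arr 0 := by
    unfold zf; rw [zero_add]
  have hDnd : (PySem.Set.ofList arr).Nodup := PySem.Set.nodup_ofList arr
  have hdperm : (PySem.List.sorted (PySem.Set.ofList arr) (fun x => x) false).Perm
      (PySem.Set.ofList arr) := PySem.List.sorted_perm _ _ _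
  have hdnd : (PySem.List.sorted (PySem.Set.ofList arr) (fun x => x) false).Nodup :=
    hdperm.nodup_iff.mpr hDnd
  have hdmem : ∀ v ∈ PySem.List.sorted (PySem.Set.ofList arr) (fun x => x) false, v ∈ arr := by
    intro v hv
    rw [PySem.List.mem_sorted] at hv
    rwa [PySem.Set.mem_ofList] at hv
  have hDmem : ∀ v ∈ PySem.Set.ofList arr, v ∈ arr := by
    intro v hv; rwa [PySem.Set.mem_ofList] at hv
  -- step 1: name the first sort
  have hpairs : PySem.List.sorted2 (zf arr 0) Prod.fst Prod.snd false
      = (PySem.List.sorted (PySem.Set.ofList arr) (fun x => x) false).flatMap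
          (fun v => blk arr v) := by
    refine sorted2_eq _ _ ?_ ?_
    · refine perm_flatMap_filter (zf arr 0) _ hdnd ?_
      intro p hp
      rw [PySem.List.mem_sorted, PySem.Set.mem_ofList]
      exact zf_mem_fst arr 0 hp
    · rw [List.pairwise_flatMap]
      constructor
      · intro v _
        refine ((zf_pairwise arr 0).filter _).imp_of_mem ?_
        intro p q hp hq hlt
        exact blex_of_fst_eq_snd_lt ((blk_fst arr v hp).trans (blk_fst arr v hq).symm) hlt
      · refine (PySem.List.sorted_ofList_pairwise_lt arr).imp_of_mem ?_
        intro v w _ _ hvw x hx y hy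
        refine blex_of_fst_lt ?_
        rw [blk_fst arr v hx, blk_fst arr w hy]
        exact hvw
  -- step 2: the first scan
  rcases scan1_blocks arr (PySem.List.sorted (PySem.Set.ofList arr) (fun x => x) false)
      none 0 [] hdnd hdmem (fun v _ => by simp) with ⟨pr1, c1, hscan1⟩
  -- step 3: name the second sort
  have hbyval : PySem.List.sorted2
      ((PySem.List.sorted (PySem.Set.ofList arr) (fun x => x) false).flatMap
        (fun v => (blk arr v).map (fun p => (fidx arr v, p.2)))) Prod.fst Prod.snd false
      = (PySem.Set.ofList arr).flatMap
          (fun v => (blk arr v).map (fun p => (fidx arr v, p.2))) := by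
    refine sorted2_eq _ _ ?_ ?_
    · exact List.Perm.flatMap hdperm.symm (fun a _ => List.Perm.refl _)
    · rw [List.pairwise_flatMap]
      constructor
      · intro v _
        rw [List.pairwise_map]
        refine (blk_snd_pairwise arr v).imp_of_mem ?_
        intro p q _ _ hlt
        exact blex_of_fst_eq_snd_lt rfl hlt
      · refine (D_pairwise_idxOf arr).imp_of_mem ?_
        intro v w _ _ hvw x hx y hy
        rcases List.mem_map.mp hx with ⟨p, _, rfl⟩
        rcases List.mem_map.mp hy with ⟨q, _, rfl⟩
        refine blex_of_fst_lt ?_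
        show fidx arr v < fidx arr w
        unfold fidx
        exact_mod_cast hvw
  -- step 4: the second scan
  rcases scan2_blocks arr (PySem.Set.ofList arr) none (-1) [] hDnd hDmem
      ((D_pairwise_idxOf arr).imp (fun h => by unfold fidx; exact_mod_cast h))
      (fun v _ => by simp)
      (fun v hv => by unfold rkD; omega) with ⟨pr2, c2, hscan2⟩
  -- step 5: name the third sort
  have houtp : PySem.List.sorted2
      ((PySem.Set.ofList arr).flatMap (fun v => (blk arr v).map (fun p => (p.2, rkD arr v))))
      Prod.fst Prod.snd false
      = (zf arr 0).map (fun p => (p.2, rkD arr p.1)) := by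
    refine sorted2_eq _ _ ?_ ?_
    · have hcongr : (PySem.Set.ofList arr).flatMap
          (fun v => (blk arr v).map (fun p => (p.2, rkD arr v)))
          = (PySem.Set.ofList arr).flatMap
              (fun v => (blk arr v).map (fun p => (p.2, rkD arr p.1))) := by
        refine List.flatMap_congr ?_
        intro v _
        refine (List.map_congr_left ?_).symm
        intro p hp
        rw [blk_fst arr v hp]
      rw [hcongr, ← List.map_flatMap]
      refine List.Perm.map _ ?_
      refine (perm_flatMap_filter (zf arr 0) _ hDnd ?_).symm
      intro p hp
      rw [PySem.Set.mem_ofList]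
      exact zf_mem_fst arr 0 hp
    · rw [List.pairwise_map]
      refine (zf_pairwise arr 0).imp_of_mem ?_
      intro p q _ _ hlt
      exact blex_of_fst_lt hlt
  -- assemble
  have hmapf : ∀ (f : Int → Int), (zf arr 0).map (fun p => f p.1) = arr.map f := by
    intro f
    have h := congrArg (List.map f) (zf_fst arr 0)
    rw [List.map_map] at h
    exact h
  simp only [array_structure_alt]
  rw [hZ, hpairs, hscan1]
  dsimp only
  rw [List.nil_append, hbyval, hscan2]
  dsimp only
  rw [List.nil_append, houtp, List.map_map]
  exact hmapf (fun x => rkD arr x)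

-- ===== VERDICT (by name: the statement is the Claim_ definition above) =====
theorem array_structure_spec : Claim_equal_array_structure := by
  intro arr _
  unfold Spec_array_structure
  rw [portA_eq, portB_eq]
  refine List.map_congr_left ?_
  intro x hx
  rw [ddict_getD _ (PySem.Set.nodup_ofList arr), if_pos (by rw [PySem.Set.mem_ofList]; exact hx)]
  rfl
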